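-- pv_equiv track=rewrite | github.com/m-inamori/Graphite | python/Imputer.py | is_all_same_without_N
-- ===== SOURCE A (Python) =====
-- def is_all_same_without_N(seq: str) -> bool:
-- 	prev_c = '-'
-- 	for c in seq:
-- 		if c == 'N':
-- 			continue
-- 		elif prev_c == '-':
-- 			prev_c = c
-- 		elif c != prev_c:
-- 			return False
-- 	else:
-- 		return True
-- ===== SOURCE B (Python) =====
-- def is_all_same_without_N(seq: str) -> bool:
-- 	t = seq.replace('N', '')
-- 	return t == t[:1] * len(t)
-- ===== Notes on version B (the rewrite author's own statement) =====
-- stated objective: faster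
-- what changed: B replaces A's per-character Python state machine (prev_c with a '-' not-yet-seen sentinel and an early return) by two loop-free staged passes in C-level builtins: strip the 'N's with str.replace, then test whether the result equals its one-character prefix replicated to its length.
-- intended difference: On strings whose non-'N' characters are one or more leading '-' followed by one or more copies of a single other character (e.g. '-a'), A returns True because its '-' sentinel swallows the leading dashes, while B returns False, which is the intended answer since '-' and that character are two different non-'N' characters. — e.g. on is_all_same_without_N("-a"): A returns true, B returns false
import Mathlib
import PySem

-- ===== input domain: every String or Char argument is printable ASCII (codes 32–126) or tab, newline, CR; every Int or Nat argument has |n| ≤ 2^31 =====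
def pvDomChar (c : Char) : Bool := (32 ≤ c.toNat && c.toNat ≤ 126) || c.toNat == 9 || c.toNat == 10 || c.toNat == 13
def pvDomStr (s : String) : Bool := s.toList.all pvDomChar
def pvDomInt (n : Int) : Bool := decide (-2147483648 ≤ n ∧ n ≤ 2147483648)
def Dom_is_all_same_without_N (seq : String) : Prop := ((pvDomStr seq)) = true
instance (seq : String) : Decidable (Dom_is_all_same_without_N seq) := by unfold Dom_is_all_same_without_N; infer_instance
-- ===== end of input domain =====

-- B replaces A's prev-character state machine by two loop-free staged passes: strip the 'N's
-- with str.replace, then compare the result with its one-character prefix replicated to its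
-- length (simpler); they intentionally differ on D_ below, where A's '-' sentinel swallows
-- leading dashes.

-- ===== PORT A =====
-- the for-loop over seq with early 'return False', carrying prev_c
def pvLoopA : Char → List Char → Bool
  | _, [] => true
  | prev, c :: cs =>
    if c = 'N' then pvLoopA prev cs
    else if prev = '-' then pvLoopA c cs
    else if c ≠ prev then false
    else pvLoopA prev cs

def is_all_same_without_N (seq : String) : Bool := pvLoopA '-' seq.toList

-- ===== PORT B =====
-- t = seq.replace('N', ''); return t == t[:1] * len(t)
-- (string repetition 'u * n' is ported by hand, exactly, as the flattening of n copies of u)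
def is_all_same_without_N_alt (seq : String) : Bool :=
  let t := PySem.Chars.replace seq.toList "N".toList "".toList
  t == (List.replicate (PySem.Chars.len t).toNat (PySem.Chars.slice t none (some 1))).flatten

-- ===== PRECONDITION & SPEC =====
-- On strings whose non-'N' chars are one or more leading '-' followed by one or more copies of
-- one other character, A returns True (its '-' sentinel swallows the dashes) while B returns the
-- intended False: '-' and that character are two distinct non-'N' characters.
def D_is_all_same_without_N (seq : String) : Prop :=
  (seq.toList.contains '-'
    && seq.toList.any (fun x => x ≠ '-' && x ≠ 'N'
        && seq.toList.all (fun c => c = 'N' || c = '-' || c = x)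
        && (seq.toList.dropWhile (fun c => c ≠ x)).all (fun c => c ≠ '-'))) = true
instance (seq : String) : Decidable (D_is_all_same_without_N seq) := by
  unfold D_is_all_same_without_N; infer_instance

def Spec_is_all_same_without_N (seq : String) (out : Bool) : Prop :=
  ¬ D_is_all_same_without_N seq → out = is_all_same_without_N_alt seq
instance (seq : String) (out : Bool) : Decidable (Spec_is_all_same_without_N seq out) := by
  unfold Spec_is_all_same_without_N; infer_instance

def pvDiffWitness_is_all_same_without_N : String := "-a"
def pvDiffWitnessOut_is_all_same_without_N : Bool × Bool := (true, false)

-- ===== CLAIM (what is proved, stated in full; the proofs are below) =====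
def Claim_unchanged_is_all_same_without_N : Prop := ∀ (seq : String), Dom_is_all_same_without_N seq → Spec_is_all_same_without_N seq (is_all_same_without_N seq)
def Claim_changed_is_all_same_without_N : Prop := Dom_is_all_same_without_N (pvDiffWitness_is_all_same_without_N) ∧ D_is_all_same_without_N (pvDiffWitness_is_all_same_without_N) ∧ is_all_same_without_N (pvDiffWitness_is_all_same_without_N) = pvDiffWitnessOut_is_all_same_without_N.1 ∧ is_all_same_without_N_alt (pvDiffWitness_is_all_same_without_N) = pvDiffWitnessOut_is_all_same_without_N.2 ∧ pvDiffWitnessOut_is_all_same_without_N.1 ≠ pvDiffWitnessOut_is_all_same_without_N.2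
def Claim_exact_is_all_same_without_N : Prop := ∀ (seq : String), Dom_is_all_same_without_N seq → D_is_all_same_without_N seq → is_all_same_without_N seq ≠ is_all_same_without_N_alt seq

-- ===== LEMMAS AND PROOFS =====

-- str.replace with a single-character pattern and empty replacement is a filter
theorem replace_go_filter (l : List Char) : ∀ (fuel : Nat) (acc : List Char),
    l.length ≤ fuel →
    PySem.Chars.replace.go "N".toList [] fuel l acc
      = acc.reverse ++ l.filter (fun c => c ≠ 'N') := by
  induction l with
  | nil =>
    intro fuel acc _
    cases fuel <;> simp [PySem.Chars.replace.go]
  | cons c cs ih =>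
    intro fuel acc h
    match fuel with
    | 0 => simp at h
    | f + 1 =>
      have hf : cs.length ≤ f := by simp at h; omega
      by_cases hc : c = 'N'
      · subst hc
        have hpre : "N".toList.isPrefixOf ('N' :: cs) = true := by
          simp [List.isPrefixOf]
        simp only [PySem.Chars.replace.go, hpre, if_true]
        rw [show (List.drop "N".toList.length ('N' :: cs)) = cs by simp]
        rw [ih f _ hf]
        simp
      · have hpre : "N".toList.isPrefixOf (c :: cs) = false := by
          simp [List.isPrefixOf]
          intro h'; exact absurd h'.symm hc
        simp only [PySem.Chars.replace.go, hpre]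
        rw [if_neg (by simp)]
        rw [ih f _ hf]
        simp [hc]

theorem replace_filter (s : List Char) :
    PySem.Chars.replace s "N".toList "".toList = s.filter (fun c => c ≠ 'N') := by
  have : ("N".toList.isEmpty) = false := by decide
  rw [PySem.Chars.replace]
  simp only [this, Bool.false_eq_true, if_false]
  rw [show ("".toList : List Char) = [] from rfl]
  exact replace_go_filter s s.length [] (le_refl _)

-- B's replicate-and-compare test is "all elements equal the first"
theorem repTest (l : List Char) :
    (l == (List.replicate (PySem.Chars.len l).toNat (PySem.Chars.slice l none (some 1))).flatten)
      = (match l with | [] => true | c :: cs => cs.all (fun x => x = c)) := by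
  match l with
  | [] => rfl
  | c :: cs =>
    have h1 : PySem.Chars.slice (c :: cs) none (some 1) = [c] := by
      rw [PySem.Chars.slice_eq_listSlice]
      rw [show (1:Int) = ((1:Nat):Int) from rfl, PySem.List.slice_to_natCast]
      simp
    have h2 : (PySem.Chars.len (c :: cs)).toNat = cs.length + 1 := by
      rw [PySem.Chars.len_eq]; simp
    rw [h1, h2]
    have h3 : (List.replicate (cs.length + 1) [c]).flatten = List.replicate (cs.length + 1) c := by
      induction (cs.length + 1) with
      | zero => rfl
      | succ n ihn => simp [List.replicate_succ, ihn]
    rw [h3, List.replicate_succ]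
    by_cases hall : ∀ x ∈ cs, x = c
    · have hcs : cs = List.replicate cs.length c := List.eq_replicate_length.mpr hall
      rw [← hcs]
      simp only [beq_self_eq_true]
      symm; rw [List.all_eq_true]; intro x hx; simpa using hall x hx
    · have hne : (c :: cs) ≠ c :: List.replicate cs.length c := by
        intro he
        have hcs : cs = List.replicate cs.length c := by injection he
        exact hall (fun x hx => List.eq_replicate_length.mp hcs x hx)
      rw [beq_eq_false_iff_ne.mpr hne]
      symm; rw [List.all_eq_false]
      push_neg at hall
      obtain ⟨x, hx, hxe⟩ := hall
      exact ⟨x, hx, by simpa using hxe⟩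

-- B on the filtered character list
theorem alt_eq (seq : String) :
    is_all_same_without_N_alt seq
      = (match seq.toList.filter (fun c => c ≠ 'N') with
         | [] => true | c :: cs => cs.all (fun x => x = c)) := by
  unfold is_all_same_without_N_alt
  rw [replace_filter, repTest]

-- proof-side restatement of D_ as a condition on the N-filtered character list
def Dspine (seq : String) : Prop :=
  (seq.toList.filter (fun c => c ≠ 'N')).head? = some '-' ∧
  ((seq.toList.filter (fun c => c ≠ 'N')).dropWhile (fun c => c = '-')) ≠ [] ∧
  (((seq.toList.filter (fun c => c ≠ 'N')).dropWhile (fun c => c = '-')).all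
      (fun c => ((seq.toList.filter (fun c => c ≠ 'N')).dropWhile (fun c => c = '-')).head? = some c)) = true

theorem filter_all_dash (u : List Char) (hu : ∀ c ∈ u, c = 'N' ∨ c = '-') :
    ∀ c ∈ u.filter (fun c => c ≠ 'N'), c = '-' := by
  intro c hc
  have h := List.mem_filter.mp hc
  rcases hu c h.1 with h' | h'
  · exact absurd h' (by simpa using h.2)
  · exact h'

theorem dropWhile_dash_nil (w : List Char) (hw : ∀ c ∈ w, c = '-') :
    w.dropWhile (fun c => c = '-') = [] :=
  List.dropWhile_eq_nil_iff.mpr (fun c hc => by simp [hw c hc])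

-- if dropWhile keeps a head, the predicate fails on it
theorem dropWhile_head_false {a : Type} (p : a → Bool) (l : List a) (x : a) (xs : List a)
    (h : l.dropWhile p = x :: xs) : p x = false := by
  induction l with
  | nil => simp at h
  | cons c cs ih =>
    rw [List.dropWhile_cons] at h
    split at h
    · exact ih h
    · cases h; exact Bool.eq_false_iff.mpr ‹¬ _›

theorem D_of_spine (seq : String) (h : Dspine seq) : D_is_all_same_without_N seq := by
  obtain ⟨hhead, hne, hall⟩ := h
  have hsplit : seq.toList.takeWhile (fun c => c = 'N' || c = '-')
      ++ seq.toList.dropWhile (fun c => c = 'N' || c = '-') = seq.toList :=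
    List.takeWhile_append_dropWhile
  match hv : seq.toList.dropWhile (fun c => c = 'N' || c = '-') with
  | [] =>
    have hq := List.dropWhile_eq_nil_iff.mp hv
    have hfd : ∀ c ∈ seq.toList.filter (fun c => c ≠ 'N'), c = '-' := by
      intro c hc
      have h1 := List.mem_filter.mp hc
      have := hq c h1.1
      simp at this
      rcases this with h' | h'
      · exact absurd h' (by simpa using h1.2)
      · exact h'
    exact absurd (dropWhile_dash_nil _ hfd) hne
  | v0 :: v' =>
    have hv0q : ((v0 = 'N' : Bool) || (v0 = '-' : Bool)) = false := by
      simpa using dropWhile_head_false _ _ _ _ hv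
    have hv0N : v0 ≠ 'N' := by simp at hv0q; exact hv0q.1
    have hv0d : v0 ≠ '-' := by simp at hv0q; exact hv0q.2
    have hl : seq.toList.takeWhile (fun c => c = 'N' || c = '-') ++ v0 :: v' = seq.toList := by
      rw [← hv]; exact hsplit
    have huq : ∀ c ∈ seq.toList.takeWhile (fun c => c = 'N' || c = '-'), c = 'N' ∨ c = '-' := by
      intro c hc
      have := List.mem_takeWhile_imp hc
      simpa using this
    have hfu := filter_all_dash _ huq
    have hf : seq.toList.filter (fun c => c ≠ 'N')
        = (seq.toList.takeWhile (fun c => c = 'N' || c = '-')).filter (fun c => c ≠ 'N')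
          ++ v0 :: v'.filter (fun c => c ≠ 'N') := by
      conv_lhs => rw [← hl]
      rw [List.filter_append]
      simp [hv0N]
    have ht : (seq.toList.filter (fun c => c ≠ 'N')).dropWhile (fun c => c = '-')
        = v0 :: v'.filter (fun c => c ≠ 'N') := by
      rw [hf, List.dropWhile_append, dropWhile_dash_nil _ hfu]
      simp [hv0d]
    rw [ht] at hall
    have hallv : ∀ c ∈ v0 :: v'.filter (fun c => c ≠ 'N'), c = v0 := by
      intro c hc
      have := List.all_eq_true.mp hall c hc
      simp at this
      exact this.symm
    have hdashu : '-' ∈ seq.toList.takeWhile (fun c => c = 'N' || c = '-') := by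
      by_contra hnd
      have hufnil : (seq.toList.takeWhile (fun c => c = 'N' || c = '-')).filter (fun c => c ≠ 'N') = [] := by
        rw [List.filter_eq_nil_iff]
        intro c hc
        rcases huq c hc with h' | h'
        · simp [h']
        · exact absurd (h' ▸ hc) hnd
      rw [hf, hufnil] at hhead
      simp at hhead
      exact hv0d hhead
    obtain ⟨u, huu⟩ : ∃ u, u = seq.toList.takeWhile (fun c => c = 'N' || c = '-') := ⟨_, rfl⟩
    rw [← huu] at hl huq hdashu
    have hvall : ∀ c ∈ v0 :: v', c = 'N' ∨ c = v0 := by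
      intro c hc
      rcases List.mem_cons.mp hc with h' | h'
      · exact Or.inr h'
      · by_cases hN : c = 'N'
        · exact Or.inl hN
        · exact Or.inr (hallv c (List.mem_cons_of_mem _ (List.mem_filter.mpr ⟨h', by simpa using hN⟩)))
    have hdwl : seq.toList.dropWhile (fun c => c ≠ v0) = v0 :: v' := by
      rw [← hl, List.dropWhile_append]
      have hunil : u.dropWhile (fun c => c ≠ v0) = [] := by
        rw [List.dropWhile_eq_nil_iff]
        intro c hc
        rcases huq c hc with h' | h' <;> simp [h', Ne.symm hv0N, Ne.symm hv0d]
      rw [hunil]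
      simp
    have hv0l : v0 ∈ seq.toList := by rw [← hl]; exact List.mem_append_right _ List.mem_cons_self
    have hdl : '-' ∈ seq.toList := by rw [← hl]; exact List.mem_append_left _ hdashu
    have hmem : ∀ c ∈ seq.toList, c = 'N' ∨ c = '-' ∨ c = v0 := by
      intro c hc
      rw [← hl] at hc
      rcases List.mem_append.mp hc with h' | h'
      · rcases huq c h' with h'' | h''
        · exact Or.inl h''
        · exact Or.inr (Or.inl h'')
      · rcases hvall c h' with h'' | h''
        · exact Or.inl h''
        · exact Or.inr (Or.inr h'')
    have hafter : ∀ c ∈ seq.toList.dropWhile (fun c => c ≠ v0), c ≠ '-' := by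
      rw [hdwl]
      intro c hc
      rcases hvall c hc with h' | h' <;> simp [h', hv0d]
    unfold D_is_all_same_without_N
    rw [Bool.and_eq_true]
    refine ⟨by simpa using hdl, ?_⟩
    rw [List.any_eq_true]
    refine ⟨v0, hv0l, ?_⟩
    simp only [Bool.and_eq_true, List.all_eq_true, decide_eq_true_eq]
    refine ⟨⟨⟨by simpa using hv0d, by simpa using hv0N⟩, ?_⟩, ?_⟩
    · intro c hc
      rcases hmem c hc with h' | h' | h' <;> simp [h']
    · intro c hc
      simpa using hafter c hc

theorem spine_of_D (seq : String) (h : D_is_all_same_without_N seq) : Dspine seq := by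
  unfold D_is_all_same_without_N at h
  rw [Bool.and_eq_true] at h
  obtain ⟨hdlb, hany⟩ := h
  obtain ⟨x, hxl, hb⟩ := List.any_eq_true.mp hany
  simp only [Bool.and_eq_true, List.all_eq_true, decide_eq_true_eq] at hb
  obtain ⟨⟨⟨hxd, hxN⟩, hmemb⟩, hafterb⟩ := hb
  have hdl : '-' ∈ seq.toList := by simpa using hdlb
  have hmem : ∀ c ∈ seq.toList, c = 'N' ∨ c = '-' ∨ c = x := fun c hc => by
    have := hmemb c hc; simp at this; tauto
  have hafter : ∀ c ∈ seq.toList.dropWhile (fun c => c ≠ x), c ≠ '-' := fun c hc => by simpa using hafterb c hc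
  have hsplit : seq.toList.takeWhile (fun c => c ≠ x)
      ++ seq.toList.dropWhile (fun c => c ≠ x) = seq.toList :=
    List.takeWhile_append_dropWhile
  match hv : seq.toList.dropWhile (fun c => c ≠ x) with
  | [] =>
    have := List.dropWhile_eq_nil_iff.mp hv x hxl
    simp at this
  | v0 :: r =>
    have hv0 : v0 = x := by
      have := dropWhile_head_false _ _ _ _ hv
      simpa using this
    subst hv0
    have hl : seq.toList.takeWhile (fun c => c ≠ v0) ++ v0 :: r = seq.toList := by
      rw [← hv]; exact hsplit
    have hw : ∀ c ∈ seq.toList.takeWhile (fun c => c ≠ v0), c = 'N' ∨ c = '-' := by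
      intro c hc
      have hcx : c ≠ v0 := by simpa using List.mem_takeWhile_imp hc
      have hcl : c ∈ seq.toList := by
        rw [← hl]; exact List.mem_append_left _ hc
      rcases hmem c hcl with h' | h' | h'
      · exact Or.inl h'
      · exact Or.inr h'
      · exact absurd h' hcx
    have hr : ∀ c ∈ r, c = 'N' ∨ c = v0 := by
      intro c hc
      have hcd : c ≠ '-' := hafter c (hv ▸ List.mem_cons_of_mem _ hc)
      have hcl : c ∈ seq.toList := by
        rw [← hl]; exact List.mem_append_right _ (List.mem_cons_of_mem _ hc)
      rcases hmem c hcl with h' | h' | h'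
      · exact Or.inl h'
      · exact absurd h' hcd
      · exact Or.inr h'
    have hdw : '-' ∈ seq.toList.takeWhile (fun c => c ≠ v0) := by
      rcases List.mem_append.mp (show ('-' : Char) ∈ _ ++ _ by rw [hl]; exact hdl) with h' | h'
      · exact h'
      · exact absurd rfl (hafter '-' (hv ▸ h'))
    have hfu := filter_all_dash _ hw
    have hrf : ∀ c ∈ r.filter (fun c => c ≠ 'N'), c = v0 := by
      intro c hc
      have h1 := List.mem_filter.mp hc
      rcases hr c h1.1 with h' | h'
      · exact absurd h' (by simpa using h1.2)
      · exact h'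
    have hf : seq.toList.filter (fun c => c ≠ 'N')
        = (seq.toList.takeWhile (fun c => c ≠ v0)).filter (fun c => c ≠ 'N')
          ++ v0 :: r.filter (fun c => c ≠ 'N') := by
      conv_lhs => rw [← hl]
      rw [List.filter_append]
      simp [hxN]
    have ht : (seq.toList.filter (fun c => c ≠ 'N')).dropWhile (fun c => c = '-')
        = v0 :: r.filter (fun c => c ≠ 'N') := by
      rw [hf, List.dropWhile_append, dropWhile_dash_nil _ hfu]
      simp [hxd]
    have hdashf : '-' ∈ (seq.toList.takeWhile (fun c => c ≠ v0)).filter (fun c => c ≠ 'N') :=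
      List.mem_filter.mpr ⟨hdw, by simp⟩
    refine ⟨?_, ?_, ?_⟩
    · rw [hf]
      match huf : (seq.toList.takeWhile (fun c => c ≠ v0)).filter (fun c => c ≠ 'N') with
      | [] => rw [huf] at hdashf; simp at hdashf
      | d :: ds =>
        have hd : d = '-' := hfu d (huf ▸ List.mem_cons_self)
        simp [hd]
    · rw [ht]; simp
    · rw [ht, List.all_eq_true]
      intro c hc
      rcases List.mem_cons.mp hc with h' | h'
      · simp [h']
      · simp [hrf c h']

-- A's loop ignores 'N's: it equals itself on the N-filtered list
theorem pvLoopA_filter (prev : Char) (l : List Char) :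
    pvLoopA prev l = pvLoopA prev (l.filter (fun c => c ≠ 'N')) := by
  induction l generalizing prev with
  | nil => rfl
  | cons c cs ih =>
    by_cases h : c = 'N'
    · simp [pvLoopA, h, ih]
    · simp [pvLoopA, h, ih]

-- once prev ≠ '-', A's loop on an N-free list is just "all equal to prev"
theorem pvLoopA_all (prev : Char) (hprev : prev ≠ '-') (l : List Char) (hl : 'N' ∉ l) :
    pvLoopA prev l = l.all (fun c => c = prev) := by
  induction l with
  | nil => rfl
  | cons c cs ih =>
    have hc : c ≠ 'N' := fun h => hl (h ▸ List.mem_cons_self)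
    have hcs : 'N' ∉ cs := fun h => hl (List.mem_cons_of_mem _ h)
    by_cases he : c = prev
    · simp [pvLoopA, hprev, he, ih hcs]
    · simp [pvLoopA, hc, hprev, he]

-- A's loop in the sentinel state skips leading '-'s
theorem pvLoopA_dash (l : List Char) (hl : 'N' ∉ l) :
    pvLoopA '-' l = pvLoopA '-' (l.dropWhile (fun c => c = '-')) := by
  induction l with
  | nil => rfl
  | cons c cs ih =>
    have hc : c ≠ 'N' := fun h => hl (h ▸ List.mem_cons_self)
    have hcs : 'N' ∉ cs := fun h => hl (List.mem_cons_of_mem _ h)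
    by_cases hd : c = '-'
    · simp [pvLoopA, hd, ih hcs]
    · simp [pvLoopA, hc, hd]

-- key characterisation used everywhere: if the N-filtered list starts with a non-'-' char,
-- A and B agree
theorem agree_of_head (seq : String) (c : Char) (cs : List Char)
    (hf : seq.toList.filter (fun c => c ≠ 'N') = c :: cs) (hc : c ≠ '-') :
    is_all_same_without_N seq = is_all_same_without_N_alt seq := by
  have hN : 'N' ∉ c :: cs := by
    intro hm
    have := List.of_mem_filter (hf ▸ hm)
    simp at this
  have hNcs : 'N' ∉ cs := fun h => hN (List.mem_cons_of_mem _ h)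
  rw [alt_eq, hf]
  unfold is_all_same_without_N
  rw [pvLoopA_filter, hf]
  have hcN : c ≠ 'N' := fun h => hN (h ▸ List.mem_cons_self)
  simp [pvLoopA, hcN, pvLoopA_all c hc cs hNcs]

-- the main case analysis, shared by the unchanged- and tight-theorems: the two ports on any
-- string whose filtered form starts with '-'
theorem decide_eq_comm (a b : Char) : decide (a = b) = decide (b = a) := by
  by_cases h : a = b
  · subst h; rfl
  · simp [h, Ne.symm h]

theorem dash_case (seq : String) (cs : List Char)
    (hl : seq.toList.filter (fun c => c ≠ 'N') = '-' :: cs) :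
    (is_all_same_without_N seq
        = (('-' :: cs).dropWhile (fun c => c = '-')).all
            (fun c => decide ((('-' :: cs).dropWhile (fun c => c = '-')).head? = some c))) ∧
    (is_all_same_without_N_alt seq = cs.all (fun c => c = '-')) := by
  have hN : 'N' ∉ '-' :: cs := by
    intro hm
    have := List.of_mem_filter (hl ▸ hm)
    simp at this
  constructor
  · unfold is_all_same_without_N
    rw [pvLoopA_filter, hl, pvLoopA_dash _ hN]
    match ht : ('-' :: cs).dropWhile (fun c => c = '-') with
    | [] => simp [pvLoopA]
    | x :: xs =>
      have hx : x ≠ '-' := by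
        have := dropWhile_head_false _ _ _ _ ht
        simpa using this
      have hNd : 'N' ∉ x :: xs := fun hm =>
        hN ((List.dropWhile_sublist _).mem (ht ▸ hm))
      have hxN : x ≠ 'N' := fun h => hNd (h ▸ List.mem_cons_self)
      have hxsN : 'N' ∉ xs := fun h => hNd (List.mem_cons_of_mem _ h)
      have h1 : pvLoopA '-' (x :: xs) = pvLoopA x xs := by simp [pvLoopA, hxN]
      rw [h1, pvLoopA_all x hx xs hxsN]
      simp only [List.all_cons, List.head?_cons, Option.some.injEq]
      simp only [decide_true, Bool.true_and]
      have hfun : (fun c : Char => decide (c = x)) = (fun c => decide (x = c)) :=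
        funext (fun c => decide_eq_comm c x)
      rw [hfun]
  · rw [alt_eq, hl]

-- ===== VERDICT (by name: the statement is the Claim_ definition above) =====
theorem is_all_same_without_N_spec : Claim_unchanged_is_all_same_without_N := by
  intro seq _ hnD
  show is_all_same_without_N seq = is_all_same_without_N_alt seq
  match hl : seq.toList.filter (fun c => c ≠ 'N') with
  | [] =>
    rw [alt_eq, hl]
    unfold is_all_same_without_N
    rw [pvLoopA_filter, hl]
    rfl
  | c :: cs =>
    by_cases hc : c = '-'
    · subst hc
      obtain ⟨hA, hB⟩ := dash_case seq cs hl
      rw [hA, hB]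
      have hnS : ¬ Dspine seq := fun hs => hnD (D_of_spine seq hs)
      unfold Dspine at hnS
      rw [hl] at hnS
      match ht : ('-' :: cs).dropWhile (fun c => c = '-') with
      | [] =>
        have hall := List.dropWhile_eq_nil_iff.mp ht
        simp only [List.all_nil]
        symm
        rw [List.all_eq_true]
        intro x hx
        simpa using hall x (List.mem_cons_of_mem _ hx)
      | x :: xs =>
        have hx : x ≠ '-' := by
          have := dropWhile_head_false _ _ _ _ ht
          simpa using this
        have hnall : ((x :: xs).all fun c => decide ((x :: xs).head? = some c)) ≠ true := by
          intro hall2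
          apply hnS
          refine ⟨rfl, ?_, ?_⟩
          · rw [ht]; simp
          · rw [ht]; exact hall2
        have hmem : x ∈ cs := by
          have hx1 : x ∈ ('-' :: cs).dropWhile (fun c => c = '-') := ht ▸ List.mem_cons_self
          have hx2 := (List.dropWhile_sublist _).mem hx1
          rcases List.mem_cons.mp hx2 with h | h
          · exact absurd h hx
          · exact h
        have hBfalse : cs.all (fun c => decide (c = '-')) = false := by
          rw [List.all_eq_false]
          exact ⟨x, hmem, by simpa using hx⟩
        rw [hBfalse]
        exact Bool.eq_false_iff.mpr hnall
    · exact agree_of_head seq c cs hl hc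

set_option maxRecDepth 8192 in
theorem is_all_same_without_N_changed : Claim_changed_is_all_same_without_N := by
  unfold Claim_changed_is_all_same_without_N
  refine ⟨by decide, D_of_spine _ ?_, by decide, by decide, by decide⟩
  refine ⟨by decide, by decide, by decide⟩

theorem is_all_same_without_N_tight : Claim_exact_is_all_same_without_N := by
  intro seq _ hD
  have hS := spine_of_D seq hD
  unfold Dspine at hS
  obtain ⟨hhead, hne, hall⟩ := hS
  match hl : seq.toList.filter (fun c => c ≠ 'N') with
  | [] => rw [hl] at hhead; simp at hhead
  | c :: cs =>
    rw [hl] at hhead hne hall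
    have hc : c = '-' := by simpa using hhead
    subst hc
    obtain ⟨hA, hB⟩ := dash_case seq cs hl
    rw [hA, hB, hall]
    intro hcontra
    have hBtrue : cs.all (fun c => decide (c = '-')) = true := hcontra.symm
    match ht : ('-' :: cs).dropWhile (fun c => c = '-') with
    | [] => exact hne ht
    | x :: xs =>
      have hx : x ≠ '-' := by
        have := dropWhile_head_false _ _ _ _ ht
        simpa using this
      have hx1 : x ∈ ('-' :: cs).dropWhile (fun c => c = '-') := ht ▸ List.mem_cons_self
      have hx2 := (List.dropWhile_sublist _).mem hx1
      rcases List.mem_cons.mp hx2 with h | h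
      · exact absurd h hx
      · exact hx (by simpa using (List.all_eq_true.mp hBtrue) x h)
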